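-- pv_equiv track=rewrite | github.com/saidsurucu/borsa-mcp | providers/isyatirim_provider.py | _get_latest_period
-- ===== SOURCE A (Python) =====
-- from typing import Dict, Any, List, Optional
--
-- def _get_latest_period(tablo: List[Dict]) -> str:
--     """Get the latest period label from the financial table."""
--     if not tablo:
--         return "N/A"
--
--     # Get all date columns from first row
--     first_row = tablo[0] if tablo else {}
--     date_columns = [k for k in first_row.keys() if k != "Kalem"]
--     date_columns.sort(reverse=True)
--
--     if date_columns:
--         # Format: 2025-09-30 -> 9/2025
--         try:
--             parts = date_columns[0].split("-")
--             if len(parts) == 3: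
--                 return f"{int(parts[1])}/{parts[0]}"
--         except (ValueError, IndexError):
--             pass
--         return date_columns[0]
--
--     return "N/A"
-- ===== SOURCE B (Python) =====
-- def _get_latest_period(tablo):
--     """Get the latest period label from the financial table."""
--     if not tablo:
--         return "N/A"
--     # single pass over the first row's keys, tracking the lexicographic max
--     latest = None
--     for k in tablo[0]:
--         if k != "Kalem" and (latest is None or k > latest):
--             latest = k
--     if latest is None:
--         return "N/A"
--     parts = latest.split("-")
--     if len(parts) == 3:
--         year, month, _day = parts
--         try:
--             return f"{int(month)}/{year}"
--         except ValueError: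
--             pass
--     return latest
-- ===== Notes on version B (the rewrite author's own statement) =====
-- stated objective: alternative
-- what changed: Replaces build-list + full reverse sort + index [0] with a single fold over the first row's keys that filters 'Kalem' and tracks the running lexicographic maximum in one pass, and replaces the length-3 check with indexing by a direct 3-element destructuring of the split.
import Mathlib
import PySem

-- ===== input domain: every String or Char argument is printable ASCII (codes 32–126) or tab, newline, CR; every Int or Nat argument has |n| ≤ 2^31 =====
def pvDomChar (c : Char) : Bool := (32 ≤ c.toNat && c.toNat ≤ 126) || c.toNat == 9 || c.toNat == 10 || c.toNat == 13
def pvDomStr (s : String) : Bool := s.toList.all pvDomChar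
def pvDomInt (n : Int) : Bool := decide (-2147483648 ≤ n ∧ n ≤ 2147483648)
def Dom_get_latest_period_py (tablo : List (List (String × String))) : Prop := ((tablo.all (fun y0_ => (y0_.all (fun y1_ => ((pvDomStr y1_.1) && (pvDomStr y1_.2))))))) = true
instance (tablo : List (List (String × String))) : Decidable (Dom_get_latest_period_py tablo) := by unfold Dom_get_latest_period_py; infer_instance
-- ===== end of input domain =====

-- B replaces A's build-list + reverse-sort + [0] with a single running-max fold over the
-- first row's keys; return values agree on all inputs (objective: alternative).

-- ===== PORT A =====
def get_latest_period_py (tablo : List (List (String × String))) : String :=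
  match tablo with
  | [] => "N/A"
  | first_row :: _ =>
    let date_columns := ((PySem.Dict.ofList first_row).keys).filter (fun k => k != "Kalem")
    match PySem.List.sorted date_columns (fun x => x) true with
    | [] => "N/A"
    | d :: _ =>
      let parts := (PySem.Str.split? d "-").getD []   -- "-" ≠ "", so split? always returns a value
      if parts.length = 3 then
        match PySem.Int.ofStr? (PySem.List.pyGetD parts 1 "") with
        | some n => PySem.Int.toStr n ++ "/" ++ PySem.List.pyGetD parts 0 ""
        | none => d
      else d

-- ===== PORT B =====
-- loop body: if k != "Kalem" and (latest is None or k > latest): latest = k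
def pvMaxStep (acc : Option String) (k : String) : Option String :=
  if k == "Kalem" then acc
  else
    match acc with
    | none => some k
    | some l => if l < k then some k else acc

def get_latest_period_py_alt (tablo : List (List (String × String))) : String :=
  match tablo with
  | [] => "N/A"
  | first_row :: _ =>
    match (PySem.Dict.ofList first_row).keys.foldl pvMaxStep none with
    | none => "N/A"
    | some latest =>
      match (PySem.Str.split? latest "-").getD [] with   -- "-" ≠ "", so split? always returns a value
      | [year, month, _day] =>
        match PySem.Int.ofStr? month with
        | some n => PySem.Int.toStr n ++ "/" ++ year
        | none => latest
      | _ => latest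

-- ===== PRECONDITION & SPEC =====
def Spec_get_latest_period_py (tablo : List (List (String × String))) (out : String) : Prop := out = get_latest_period_py_alt tablo
instance (tablo : List (List (String × String))) (out : String) : Decidable (Spec_get_latest_period_py tablo out) := by unfold Spec_get_latest_period_py; infer_instance

-- ===== CLAIM (what is proved, stated in full; the proofs are below) =====
def Claim_equal_get_latest_period_py : Prop := ∀ (tablo : List (List (String × String))), Dom_get_latest_period_py tablo → Spec_get_latest_period_py tablo (get_latest_period_py tablo)

-- ===== LEMMAS AND PROOFS =====

-- the fold over all keys equals the fold over the non-"Kalem" keys (pvMaxStep skips "Kalem")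
theorem foldl_pvMaxStep_filter (ks : List String) (acc : Option String) :
    ks.foldl pvMaxStep acc = (ks.filter (fun k => k != "Kalem")).foldl pvMaxStep acc := by
  induction ks generalizing acc with
  | nil => rfl
  | cons x t ih =>
    by_cases hx : x = "Kalem"
    · simp [hx, pvMaxStep, ih]
    · have hb : (x != "Kalem") = true := by simpa using hx
      simp only [List.foldl, List.filter, hb]
      rw [ih]

-- on a list without "Kalem", the fold from (some l) is the running max
theorem foldl_pvMaxStep_some (t : List String) (l : String)
    (h : ∀ k ∈ t, k ≠ "Kalem") :
    t.foldl pvMaxStep (some l) = some (t.foldl max l) := by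
  induction t generalizing l with
  | nil => rfl
  | cons x s ih =>
    have hx : x ≠ "Kalem" := h x (by simp)
    have hs : ∀ k ∈ s, k ≠ "Kalem" := fun k hk => h k (by simp [hk])
    simp only [List.foldl, pvMaxStep, beq_iff_eq, hx]
    by_cases hlt : l < x
    · simp [hlt, ih _ hs, max_eq_right (le_of_lt hlt)]
    · simp [hlt, ih _ hs, max_eq_left (le_of_not_gt hlt)]

-- the two period-formatting tails agree on any string
theorem fmt_eq (d : String) :
    (let parts := (PySem.Str.split? d "-").getD [];
     if parts.length = 3 then
       match PySem.Int.ofStr? (PySem.List.pyGetD parts 1 "") with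
       | some n => PySem.Int.toStr n ++ "/" ++ PySem.List.pyGetD parts 0 ""
       | none => d
     else d)
    = (match (PySem.Str.split? d "-").getD [] with
       | [year, month, _day] =>
         match PySem.Int.ofStr? month with
         | some n => PySem.Int.toStr n ++ "/" ++ year
         | none => d
       | _ => d) := by
  generalize (PySem.Str.split? d "-").getD [] = parts
  match parts with
  | [] => rfl
  | [a] => rfl
  | [a, b] => rfl
  | [a, b, c] => simp [PySem.List.pyGetD, PySem.List.pyGet?, PySem.List.pyIdx?]
  | a :: b :: c :: e :: rest => simp

-- ===== VERDICT (by name: the statement is the Claim_ definition above) =====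
theorem get_latest_period_py_spec : Claim_equal_get_latest_period_py := by
  intro tablo _
  unfold Spec_get_latest_period_py get_latest_period_py get_latest_period_py_alt
  match tablo with
  | [] => rfl
  | first_row :: rest =>
    simp only []
    rw [foldl_pvMaxStep_filter]
    set dc := ((PySem.Dict.ofList first_row).keys).filter (fun k => k != "Kalem") with hdc
    have hnk : ∀ k ∈ dc, k ≠ "Kalem" := by
      intro k hk
      have := List.of_mem_filter hk
      simpa using this
    match hdcv : dc with
    | [] => rfl
    | x :: t =>
      have hxne : x ≠ "Kalem" := hnk x (by simp)
      have htne : ∀ k ∈ t, k ≠ "Kalem" := fun k hk => hnk k (by simp [hk])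
      have hfold : (x :: t).foldl pvMaxStep none = some (t.foldl max x) := by
        simp only [List.foldl, pvMaxStep, beq_iff_eq, if_neg hxne]
        exact foldl_pvMaxStep_some t x htne
      rw [hfold]
      have hmax : PySem.List.max? (x :: t) (fun y => y) = some (t.foldl max x) :=
        PySem.List.max?_id_cons x t
      match hs : PySem.List.sorted (x :: t) (fun y : String => y) true with
      | [] => exact absurd ((PySem.List.sorted_eq_nil_iff _ _ _).mp hs) (by simp)
      | d :: ts =>
        have hd_mem : d ∈ x :: t := by
          rw [← PySem.List.mem_sorted (x :: t) (fun y : String => y) true d, hs]; simp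
        have hm_mem : t.foldl max x ∈ x :: t := PySem.List.max?_mem hmax
        have hde : d = t.foldl max x :=
          le_antisymm (PySem.List.max?_isMax hmax d hd_mem)
            (PySem.List.key_head_sorted_rev_ge (x :: t) (fun y => y) hs _ hm_mem)
        rw [← hde]
        exact fmt_eq d
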